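-- pv_equiv track=rewrite | github.com/sumtuckyi/algorithm.py | TIL/practice.py | cal_abs
-- ===== SOURCE A (Python) =====
-- def cal_abs(new_list):
--
--     dx = [-1, 1, 0, 0]  # 상하좌우
--     dy = [0, 0, -1, 1]
--
--     x, y = 0, 0
--     current = 0
--     result = 0
--     for i in range(5):
--         for j in range(5):
--             current = new_list[i][j]
--             direction = 0
--             total = 0
--             while direction < 4:
--                 y, x = j, i
--                 y, x = y+dy[direction], x+dx[direction]
--                 if 0 <= x <= 4 and 0 <= y <= 4 :
--                     total += abs(current - new_list[x][y])
--                     direction += 1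
--                 else:
--                     direction += 1
--             result += total
--     return result
-- ===== SOURCE B (Python) =====
-- def cal_abs(new_list):
--     # Visit each horizontal and vertical adjacent pair once, then double
--     # (A counts every edge from both endpoints).
--     s = 0
--     for i in range(5):
--         for j in range(4):
--             s += abs(new_list[i][j] - new_list[i][j + 1])
--             s += abs(new_list[j][i] - new_list[j + 1][i])
--     return 2 * s
-- ===== Notes on version B (the rewrite author's own statement) =====
-- stated objective: simpler
-- what changed: Instead of scanning all four directions from every cell with a while-loop and bounds checks, B sums each unique horizontal and vertical adjacent pair exactly once and doubles the total.
import Mathlib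
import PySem

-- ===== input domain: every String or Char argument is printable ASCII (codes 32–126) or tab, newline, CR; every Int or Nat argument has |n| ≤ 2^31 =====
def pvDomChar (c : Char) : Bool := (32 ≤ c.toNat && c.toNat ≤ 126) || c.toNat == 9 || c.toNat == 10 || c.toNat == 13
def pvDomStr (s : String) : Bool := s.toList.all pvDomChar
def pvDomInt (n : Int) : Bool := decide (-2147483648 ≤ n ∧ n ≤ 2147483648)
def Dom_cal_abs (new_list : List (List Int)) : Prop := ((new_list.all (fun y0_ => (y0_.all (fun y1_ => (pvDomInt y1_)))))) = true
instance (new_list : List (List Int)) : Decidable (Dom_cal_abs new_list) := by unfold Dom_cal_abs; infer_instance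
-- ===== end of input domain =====

-- B visits each unique adjacent pair once and doubles the sum, instead of A's
-- four-direction scan from every cell; same value on every 5x5-accessible grid.

-- grid[x][y] (indices known in range under Pre_)
def pvCell (g : List (List Int)) (x y : Int) : Int :=
  PySem.List.pyGetD (PySem.List.pyGetD g x []) y 0

-- ===== PORT A =====
def cal_abs (new_list : List (List Int)) : Int :=
  let dx : List Int := [-1, 1, 0, 0]
  let dy : List Int := [0, 0, -1, 1]
  List.foldl (fun result i =>
    List.foldl (fun result j =>
      let current := pvCell new_list i j
      -- while direction < 4: direction is incremented on every iteration,
      -- so the while loop is exactly a pass over directions 0,1,2,3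
      let total := List.foldl (fun total direction =>
        let y := j + PySem.List.pyGetD dy direction 0
        let x := i + PySem.List.pyGetD dx direction 0
        if 0 ≤ x ∧ x ≤ 4 ∧ 0 ≤ y ∧ y ≤ 4 then
          total + |current - pvCell new_list x y|
        else total) 0 (PySem.List.pyRange 0 4 1)
      result + total) result (PySem.List.pyRange 0 5 1))
    0 (PySem.List.pyRange 0 5 1)

-- ===== PORT B =====
def cal_abs_alt (new_list : List (List Int)) : Int :=
  let s := List.foldl (fun s i =>
    List.foldl (fun s j =>
      s + |pvCell new_list i j - pvCell new_list i (j + 1)|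
        + |pvCell new_list j i - pvCell new_list (j + 1) i|)
      s (PySem.List.pyRange 0 4 1)) 0 (PySem.List.pyRange 0 5 1)
  2 * s

-- ===== PRECONDITION & SPEC =====
-- A indexes rows 0..4 and columns 0..4; on anything shorter Python raises IndexError.
def Pre_cal_abs (new_list : List (List Int)) : Prop :=
  5 ≤ new_list.length ∧ ∀ r ∈ new_list.take 5, 5 ≤ r.length
instance (new_list : List (List Int)) : Decidable (Pre_cal_abs new_list) := by
  unfold Pre_cal_abs; infer_instance
def pvWitness_cal_abs : List (List Int) :=
  [[1,2,3,4,5],[5,4,3,2,1],[0,0,0,0,0],[7,7,7,7,7],[1,0,1,0,1]]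
def Spec_cal_abs (new_list : List (List Int)) (out : Int) : Prop := out = cal_abs_alt new_list
instance (new_list : List (List Int)) (out : Int) : Decidable (Spec_cal_abs new_list out) := by
  unfold Spec_cal_abs; infer_instance

-- ===== CLAIM (what is proved, stated in full; the proofs are below) =====
def Claim_equal_cal_abs : Prop := ∀ (new_list : List (List Int)), Dom_cal_abs new_list → Pre_cal_abs new_list → Spec_cal_abs new_list (cal_abs new_list)

-- ===== LEMMAS AND PROOFS =====

-- ===== VERDICT (by name: the statement is the Claim_ definition above) =====
set_option maxHeartbeats 2000000 in
theorem cal_abs_spec : Claim_equal_cal_abs := by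
  intro g _ _
  unfold Spec_cal_abs cal_abs cal_abs_alt
  simp only [show PySem.List.pyRange 0 5 1 = [0,1,2,3,4] by decide,
             show PySem.List.pyRange 0 4 1 = [0,1,2,3] by decide,
             show PySem.List.pyGetD ([-1,1,0,0] : List Int) 0 0 = -1 by decide,
             show PySem.List.pyGetD ([-1,1,0,0] : List Int) 1 0 = 1 by decide,
             show PySem.List.pyGetD ([-1,1,0,0] : List Int) 2 0 = 0 by decide,
             show PySem.List.pyGetD ([-1,1,0,0] : List Int) 3 0 = 0 by decide,
             show PySem.List.pyGetD ([0,0,-1,1] : List Int) 0 0 = 0 by decide,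
             show PySem.List.pyGetD ([0,0,-1,1] : List Int) 1 0 = 0 by decide,
             show PySem.List.pyGetD ([0,0,-1,1] : List Int) 2 0 = -1 by decide,
             show PySem.List.pyGetD ([0,0,-1,1] : List Int) 3 0 = 1 by decide,
             List.foldl]
  simp only [Int.reduceAdd, Int.reduceNeg]
  norm_num
  simp only [abs_sub_comm]
  ring
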